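-- pv_equiv track=rewrite | github.com/nnkennard/coref_survey | decision_tree/featurize.py | get_onehot
-- ===== SOURCE A (Python) =====
-- def get_onehot(value_list, target):
--   onehot = [0] * len(value_list)
--   for i, value in enumerate(value_list):
--     if value == target:
--       onehot[i] = 1
--       assert sum(onehot) == 1
--       return onehot
--   assert False
-- ===== SOURCE B (Python) =====
-- def get_onehot(value_list, target):
--   assert value_list
--   head, *tail = value_list
--   if head == target:
--     return [1] + [0] * len(tail)
--   return [0] + get_onehot(tail, target)
-- ===== Notes on version B (the rewrite author's own statement) =====
-- stated objective: alternative
-- what changed: Structural recursion that builds the vector head-first by list concatenation (a 0 cell per skipped head, then [1]+zeros on the match), replacing A's preallocate-zeros / enumerate / mutate-in-place / early-return loop; no index arithmetic or mutation.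
import Mathlib
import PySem

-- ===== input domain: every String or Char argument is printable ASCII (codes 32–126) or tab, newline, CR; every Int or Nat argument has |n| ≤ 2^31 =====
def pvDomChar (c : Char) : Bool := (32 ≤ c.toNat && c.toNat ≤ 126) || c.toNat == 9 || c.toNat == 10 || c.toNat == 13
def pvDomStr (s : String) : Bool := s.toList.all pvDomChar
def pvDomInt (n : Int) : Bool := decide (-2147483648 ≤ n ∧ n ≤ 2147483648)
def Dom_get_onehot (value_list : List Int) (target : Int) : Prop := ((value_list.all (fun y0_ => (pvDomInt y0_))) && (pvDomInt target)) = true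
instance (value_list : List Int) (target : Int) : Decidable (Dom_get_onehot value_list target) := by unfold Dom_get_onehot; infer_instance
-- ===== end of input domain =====

-- B rebuilds the vector by structural recursion and concatenation (a 0 per skipped head,
-- then [1] ++ zeros at the match) instead of A's preallocate/enumerate/mutate/early-return
-- loop; same values wherever A returns.

-- ===== PORT A =====
-- the for-loop over enumerate(value_list): early return on first match, [] stands for
-- the unreachable (under Pre_) `assert False` fall-through
def getOnehotLoopA (onehot : List Int) (target : Int) : List (Int × Int) → List Int
  | [] => []
  | (i, v) :: rest =>
      if v == target then onehot.set i.toNat 1 else getOnehotLoopA onehot target rest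

def get_onehot (value_list : List Int) (target : Int) : List Int :=
  getOnehotLoopA (List.replicate value_list.length 0) target (PySem.List.enumerate value_list 0)

-- ===== PORT B =====
-- `assert value_list` fails on [] (outside Pre_); [] stands for that raise, as it does
-- for the recursive call's eventual failure when target is absent.
def get_onehot_alt (value_list : List Int) (target : Int) : List Int :=
  match value_list with
  | [] => []
  | head :: tail =>
      if head == target then [1] ++ List.replicate tail.length 0
      else [0] ++ get_onehot_alt tail target

-- ===== PRECONDITION & SPEC =====
-- A raises AssertionError when target is absent (and B's recursion bottoms out in its
-- assert on the empty list then); those inputs are excluded.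
def Pre_get_onehot (value_list : List Int) (target : Int) : Prop := target ∈ value_list
instance (value_list : List Int) (target : Int) : Decidable (Pre_get_onehot value_list target) := by
  unfold Pre_get_onehot; infer_instance
def pvWitness_get_onehot : List Int × Int := ([3, 5, 7], 5)

def Spec_get_onehot (value_list : List Int) (target : Int) (out : List Int) : Prop := out = get_onehot_alt value_list target
instance (value_list : List Int) (target : Int) (out : List Int) : Decidable (Spec_get_onehot value_list target out) := by unfold Spec_get_onehot; infer_instance

-- ===== CLAIM (what is proved, stated in full; the proofs are below) =====
def Claim_equal_get_onehot : Prop := ∀ (value_list : List Int) (target : Int), Dom_get_onehot value_list target → Pre_get_onehot value_list target → Spec_get_onehot value_list target (get_onehot value_list target)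

-- ===== LEMMAS AND PROOFS =====

-- A's loop over enumerate (vl, k) sets position k + p of `onehot` when p is the first index
-- of target in vl.
theorem loopA_of_index? (target : Int) (onehot : List Int) :
    ∀ (vl : List Int) (k : Nat) (p : Nat), PySem.List.index? vl target = some p →
      getOnehotLoopA onehot target (PySem.List.enumerate vl (k : Int)) = onehot.set (k + p) 1 := by
  intro vl
  induction vl with
  | nil => intro k p h; simp [PySem.List.index?] at h
  | cons x xs ih =>
      intro k p h
      by_cases hx : x = target
      · subst hx
        rw [PySem.List.index?_cons_self] at h
        injection h with h; subst h
        simp [PySem.List.enumerate_cons, getOnehotLoopA]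
      · rw [PySem.List.index?_cons_of_ne xs hx] at h
        cases hq : PySem.List.index? xs target with
        | none => rw [hq] at h; simp at h
        | some q =>
            rw [hq] at h
            simp at h
            subst h
            rw [PySem.List.enumerate_cons]
            simp only [getOnehotLoopA]
            rw [if_neg (by simpa using hx)]
            have hk1 : ((k : Int) + 1) = ((k + 1 : Nat) : Int) := by push_cast; ring
            rw [hk1, ih (k + 1) q hq]
            congr 1
            omega

-- B's recursion also produces the all-zero vector with a 1 at the first index of target.
theorem altB_of_index? (target : Int) :
    ∀ (vl : List Int) (p : Nat), PySem.List.index? vl target = some p →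
      get_onehot_alt vl target = (List.replicate vl.length (0 : Int)).set p 1 := by
  intro vl
  induction vl with
  | nil => intro p h; simp [PySem.List.index?] at h
  | cons x xs ih =>
      intro p h
      by_cases hx : x = target
      · subst hx
        rw [PySem.List.index?_cons_self] at h
        injection h with h; subst h
        simp [get_onehot_alt, List.replicate_succ]
      · rw [PySem.List.index?_cons_of_ne xs hx] at h
        cases hq : PySem.List.index? xs target with
        | none => rw [hq] at h; simp at h
        | some q =>
            rw [hq] at h
            simp at h
            subst h
            simp only [get_onehot_alt]
            rw [if_neg (by simpa using hx), ih q hq]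
            simp [List.replicate_succ]

-- ===== VERDICT (by name: the statement is the Claim_ definition above) =====
theorem get_onehot_spec : Claim_equal_get_onehot := by
  intro vl t _ hmem
  unfold Spec_get_onehot get_onehot
  have hsome : (PySem.List.index? vl t).isSome := (PySem.List.index?_isSome_iff vl t).mpr hmem
  cases hq : PySem.List.index? vl t with
  | none => rw [hq] at hsome; simp at hsome
  | some p =>
      have h1 := loopA_of_index? t (List.replicate vl.length 0) vl 0 p hq
      rw [Nat.cast_zero] at h1
      rw [h1, Nat.zero_add, altB_of_index? t vl p hq]
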